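-- pv_equiv track=rewrite | github.com/MartinGangand/tradeflow | time_series/src/autoregressive/order_selection.py | dispatch_indexes
-- ===== SOURCE A (Python) =====
-- from typing import List, Literal
--
-- def dispatch_indexes(max_order: int, nb_processes: int) -> List[List[int]]:
--     slice_indexes_per_process = [[] for _ in range(nb_processes)]
--     direction = True
--     for i in range(max_order):
--         args_idx = i % nb_processes
--         new_args_idx = args_idx if direction else nb_processes - 1 - args_idx
--         direction = not(direction) if args_idx == nb_processes - 1 else direction
--         slice_indexes_per_process[new_args_idx].append(i + 1)
--
--     assert(sum([len(l) for l in slice_indexes_per_process]) == max_order)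
--     return slice_indexes_per_process
-- ===== SOURCE B (Python) =====
-- from typing import List
--
--
-- def dispatch_indexes(max_order: int, nb_processes: int) -> List[List[int]]:
--     # Bucket c receives exactly two arithmetic progressions of step 2*nb_processes:
--     # the values c+1, c+1+2p, ... (descents' even rows) and 2p-c, 4p-c, ... (odd rows);
--     # build each bucket directly from those closed-form progressions, in sorted order.
--     period = 2 * nb_processes
--     return [
--         sorted(list(range(c + 1, max_order + 1, period)) +
--                list(range(period - c, max_order + 1, period)))
--         for c in range(nb_processes)
--     ]
-- ===== Notes on version B (the rewrite author's own statement) =====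
-- stated objective: alternative
-- what changed: Instead of A's single stateful pass over all indexes (direction flag, append into the bucket picked per index), B constructs each bucket directly and independently as the sorted union of its two closed-form arithmetic progressions c+1, c+1+2p, ... and 2p-c, 4p-c, ... with period p = nb_processes.
import Mathlib
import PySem

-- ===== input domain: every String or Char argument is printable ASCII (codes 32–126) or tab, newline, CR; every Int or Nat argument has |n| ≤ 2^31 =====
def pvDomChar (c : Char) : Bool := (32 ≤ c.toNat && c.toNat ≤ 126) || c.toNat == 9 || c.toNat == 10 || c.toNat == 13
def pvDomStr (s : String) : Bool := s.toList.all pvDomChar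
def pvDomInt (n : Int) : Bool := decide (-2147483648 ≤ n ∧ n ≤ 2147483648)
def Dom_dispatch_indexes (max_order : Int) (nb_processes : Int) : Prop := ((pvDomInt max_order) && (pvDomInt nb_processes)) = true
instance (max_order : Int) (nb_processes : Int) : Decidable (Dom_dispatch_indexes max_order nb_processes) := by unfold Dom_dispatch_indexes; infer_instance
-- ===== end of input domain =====

-- B builds each bucket independently as the sorted union of two closed-form arithmetic
-- progressions (step 2*nb_processes), replacing A's index-by-index stateful dispatch; objective: alternative.


-- ===== PORT A =====
-- models `lst[j].append(x)`: index lookup (IndexError = none, excluded by Pre_) then in-place update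
def pvAppendAt (bs : List (List Int)) (j : Int) (x : Int) : List (List Int) :=
  match PySem.List.pyGet? bs j with
  | some l => PySem.List.pySetD bs j (l ++ [x])
  | none => bs

-- literal port of A; the final `assert` always holds on Pre_ (each iteration appends exactly
-- one element), and an assert failure (max_order < 0) is a raise, excluded by Pre_.
def dispatch_indexes (max_order : Int) (nb_processes : Int) : List (List Int) :=
  let init : List (List Int) := (PySem.List.pyRange 0 nb_processes 1).map (fun _ => [])
  ((PySem.List.pyRange 0 max_order 1).foldl
    (fun (st : List (List Int) × Bool) i =>
      let args_idx := PySem.Int.mod i nb_processes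
      let new_args_idx := if st.2 then args_idx else nb_processes - 1 - args_idx
      let direction := if args_idx = nb_processes - 1 then !st.2 else st.2
      (pvAppendAt st.1 new_args_idx (i + 1), direction))
    (init, true)).1

-- ===== PORT B =====
-- bucket c = sorted( range(c+1, max_order+1, 2*nb) + range(2*nb - c, max_order+1, 2*nb) )
def dispatch_indexes_alt (max_order : Int) (nb_processes : Int) : List (List Int) :=
  let period := 2 * nb_processes
  (PySem.List.pyRange 0 nb_processes 1).map (fun c =>
    PySem.List.sorted
      (PySem.List.pyRange (c + 1) (max_order + 1) period ++
       PySem.List.pyRange (period - c) (max_order + 1) period)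
      (fun x => x))

-- ===== PRECONDITION & SPEC =====
-- Pre_ excludes exactly the inputs where A raises: max_order < 0 (AssertionError) and
-- nb_processes ≤ 0 with max_order > 0 (ZeroDivisionError / IndexError in the loop).
def Pre_dispatch_indexes (max_order : Int) (nb_processes : Int) : Prop :=
  0 ≤ max_order ∧ (0 < nb_processes ∨ max_order = 0)
instance (max_order : Int) (nb_processes : Int) : Decidable (Pre_dispatch_indexes max_order nb_processes) := by unfold Pre_dispatch_indexes; infer_instance

def pvWitness_dispatch_indexes : Int × Int := (5, 2)

def Spec_dispatch_indexes (max_order : Int) (nb_processes : Int) (out : List (List Int)) : Prop := out = dispatch_indexes_alt max_order nb_processes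
instance (max_order : Int) (nb_processes : Int) (out : List (List Int)) : Decidable (Spec_dispatch_indexes max_order nb_processes out) := by unfold Spec_dispatch_indexes; infer_instance

-- ===== CLAIM (what is proved, stated in full; the proofs are below) =====
def Claim_equal_dispatch_indexes : Prop := ∀ (max_order : Int) (nb_processes : Int), Dom_dispatch_indexes max_order nb_processes → Pre_dispatch_indexes max_order nb_processes → Spec_dispatch_indexes max_order nb_processes (dispatch_indexes max_order nb_processes)

-- ===== LEMMAS AND PROOFS =====

-- the bucket index A sends the 0-based index i to (n = nb_processes as a Nat, n > 0)
def pvTgt (n : Nat) (i : Nat) : Int :=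
  if (i / n) % 2 = 0 then ((i % n : Nat) : Int) else (n : Int) - 1 - ((i % n : Nat) : Int)

-- closed form of A's bucket list after the first m loop iterations
def pvBuckets (n : Nat) (m : Nat) : List (List Int) :=
  (List.range n).map (fun (c : Nat) =>
    ((List.range m).filter (fun i => pvTgt n i == (c : Int))).map (fun (i : Nat) => (i : Int) + 1))

theorem pvTgt_bounds {n : Nat} (hn : 0 < n) (i : Nat) : 0 ≤ pvTgt n i ∧ pvTgt n i < (n : Int) := by
  unfold pvTgt
  have h := Nat.mod_lt i hn
  split <;> constructor <;> omega

theorem pvSet_map_range {α : Type} (n k : Nat) (_hk : k < n) (f : Nat → α) (v : α) :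
    ((List.range n).map f).set k v = (List.range n).map (fun c => if c = k then v else f c) := by
  apply List.ext_getElem
  · simp
  · intro c h1 h2
    simp only [List.length_set, List.length_map, List.length_range] at h1
    simp only [List.getElem_set, List.getElem_map, List.getElem_range]
    by_cases h : k = c
    · subst h; simp
    · rw [if_neg h, if_neg (fun hc : c = k => h hc.symm)]

theorem pvBuckets_succ {n : Nat} (hn : 0 < n) (m : Nat) :
    pvAppendAt (pvBuckets n m) (pvTgt n m) ((m : Int) + 1) = pvBuckets n (m + 1) := by
  obtain ⟨h0, h1⟩ := pvTgt_bounds hn m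
  set k := (pvTgt n m).toNat
  have hkt : pvTgt n m = (k : Int) := by omega
  have hkn : k < n := by omega
  have hget : (pvBuckets n m)[k]? =
      some (((List.range m).filter (fun i => pvTgt n i == (k : Int))).map (fun (i : Nat) => (i : Int) + 1)) := by
    unfold pvBuckets
    rw [List.getElem?_map, List.getElem?_range hkn]
    rfl
  unfold pvAppendAt
  rw [hkt, PySem.List.pyGet?_natCast, hget]
  simp only [PySem.List.pySetD_natCast]
  unfold pvBuckets
  rw [pvSet_map_range n k hkn]
  apply List.map_congr_left
  intro c hc
  rw [List.range_succ, List.filter_append, List.map_append, List.filter_singleton]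
  by_cases hck : c = k
  · subst hck
    simp [hkt]
  · have hne : ¬ (pvTgt n m == (c : Int)) = true := by
      simp only [beq_iff_eq, hkt]
      intro h
      exact hck (by exact_mod_cast h.symm)
    simp [hck, hne]

theorem pvDiv_succ {n : Nat} (hn : 0 < n) (m : Nat) :
    (m + 1) / n = m / n + (m % n + 1) / n := by
  conv_lhs => rw [← Nat.div_add_mod m n, Nat.add_assoc, Nat.mul_add_div hn]

-- A's loop state after the first m iterations
theorem pvA_state {n : Nat} (hn : 0 < n) (m : Nat) :
    ((PySem.List.pyRange 0 (m : Int) 1).foldl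
      (fun (st : List (List Int) × Bool) i =>
        let args_idx := PySem.Int.mod i (n : Int)
        let new_args_idx := if st.2 then args_idx else (n : Int) - 1 - args_idx
        let direction := if args_idx = (n : Int) - 1 then !st.2 else st.2
        (pvAppendAt st.1 new_args_idx (i + 1), direction))
      (pvBuckets n 0, true)) = (pvBuckets n m, decide ((m / n) % 2 = 0)) := by
  induction m with
  | zero => simp [PySem.List.pyRange_one_eq_nil, Nat.zero_div]
  | succ m ih =>
    rw [show ((m + 1 : Nat) : Int) = (m : Int) + 1 by push_cast; ring,
        PySem.List.pyRange_one_succ_right (by positivity), List.foldl_append, ih]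
    simp only [List.foldl_cons, List.foldl_nil]
    have hmod : PySem.Int.mod (m : Int) (n : Int) = ((m % n : Nat) : Int) :=
      PySem.Int.mod_natCast m n
    have hmlt : m % n < n := Nat.mod_lt m hn
    have htgt : (if (decide ((m / n) % 2 = 0)) = true then PySem.Int.mod (m : Int) (n : Int)
        else (n : Int) - 1 - PySem.Int.mod (m : Int) (n : Int)) = pvTgt n m := by
      rw [hmod]; unfold pvTgt
      by_cases hp : (m / n) % 2 = 0 <;> simp [hp]
    have hdiv := pvDiv_succ hn m
    rw [Prod.mk.injEq]
    constructor
    · rw [htgt]; exact pvBuckets_succ hn m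
    · rw [hmod]
      by_cases hlast : m % n = n - 1
      · have hone : (m % n + 1) / n = 1 := by
          rw [show m % n + 1 = n by omega, Nat.div_self hn]
        have hsucc : (m + 1) / n = m / n + 1 := by rw [hdiv, hone]
        rw [if_pos (by omega : ((m % n : Nat) : Int) = (n : Int) - 1), hsucc]
        rcases Nat.even_or_odd (m / n) with he | ho
        · have h2 : (m / n) % 2 = 0 := Nat.even_iff.mp he
          have h3 : (m / n + 1) % 2 = 1 := by omega
          simp [h2, h3]
        · have h2 : (m / n) % 2 = 1 := Nat.odd_iff.mp ho
          have h3 : (m / n + 1) % 2 = 0 := by omega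
          simp [h2, h3]
      · have hzero : (m % n + 1) / n = 0 := Nat.div_eq_of_lt (by omega)
        have hsucc : (m + 1) / n = m / n := by simp [hdiv, hzero]
        rw [if_neg (by omega : ¬ ((m % n : Nat) : Int) = (n : Int) - 1), hsucc]

-- A equals the closed form (positive nb_processes, nonnegative max_order)
theorem pvA_char {n N : Nat} (hn : 0 < n) :
    dispatch_indexes (N : Int) (n : Int) = pvBuckets n N := by
  unfold dispatch_indexes
  have hinit : ((PySem.List.pyRange 0 (n : Int) 1).map
      (fun _ => ([] : List Int))) = pvBuckets n 0 := by
    rw [PySem.List.pyRange_one]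
    unfold pvBuckets
    simp [Function.comp_def, List.map_const']
  simp only [hinit]
  rw [pvA_state hn N]

-- pvTgt in terms of the residue of the index modulo one zigzag period
theorem pvTgt_mod {n : Nat} (hn : 0 < n) (m : Nat) :
    pvTgt n m = if m % (2 * n) < n then ((m % (2 * n) : Nat) : Int)
                else (n : Int) - 1 - ((m % (2 * n) - n : Nat) : Int) := by
  unfold pvTgt
  have hmn : m % n = (m % (2 * n)) % n := (Nat.mod_mod_of_dvd m ⟨2, by ring⟩).symm
  have hdn : (m / n) % 2 = (m % (2 * n)) / n := by
    rw [show 2 * n = n * 2 by ring, Nat.mod_mul_right_div_self]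
  have ht2 : m % (2 * n) < 2 * n := Nat.mod_lt m (by omega)
  set t := m % (2 * n) with ht
  clear_value t
  rcases Nat.lt_or_ge t n with h | h
  · rw [hmn, hdn, Nat.mod_eq_of_lt h, Nat.div_eq_of_lt h, if_pos h,
      if_pos (by omega : 0 % 2 = 0)]
  · have h1 : t % n = t - n := by
      rw [Nat.mod_eq_sub_mod h, Nat.mod_eq_of_lt (by omega)]
    have h2 : t / n = 1 := by
      rw [show t = n * 1 + (t - n) by omega, Nat.mul_add_div hn, Nat.div_eq_of_lt (by omega)]
    rw [hmn, hdn, h1, h2, if_neg (by omega : ¬ t < n), if_neg (by omega : ¬ 1 % 2 = 0)]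

-- which indexes land in bucket c: exactly the residues c and 2n-1-c modulo the period
theorem pvTgt_eq_iff {n c : Nat} (hn : 0 < n) (hc : c < n) (i : Nat) :
    pvTgt n i = (c : Int) ↔ i % (2 * n) = c ∨ i % (2 * n) = 2 * n - 1 - c := by
  rw [pvTgt_mod hn i]
  have ht2 : i % (2 * n) < 2 * n := Nat.mod_lt i (by omega)
  set t := i % (2 * n)
  clear_value t
  rcases Nat.lt_or_ge t n with h | h
  · rw [if_pos h]
    constructor
    · intro he; left; exact_mod_cast he
    · intro he; rcases he with he | he <;> omega
  · rw [if_neg (by omega)]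
    constructor
    · intro he; right; omega
    · intro he; rcases he with he | he <;> omega

-- the target bucket c of the closed form, as a plain list
def pvT (n N c : Nat) : List Int :=
  ((List.range N).filter (fun i => pvTgt n i == (c : Int))).map (fun (i : Nat) => (i : Int) + 1)

theorem pvT_pairwise (n N c : Nat) : (pvT n N c).Pairwise (· < ·) := by
  unfold pvT
  refine List.Pairwise.map _ ?_ (List.Pairwise.filter _ (List.pairwise_lt_range))
  intro a b h
  omega

-- congruences survive adding/subtracting one
theorem pv_emod_succ (s a b : Int) (h : a % s = b % s) : (a + 1) % s = (b + 1) % s := by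
  rw [Int.add_emod a 1 s, Int.add_emod b 1 s, h]

theorem pv_emod_pred (s a b : Int) (h : a % s = b % s) : (a - 1) % s = (b - 1) % s := by
  rw [Int.sub_emod a 1 s, Int.sub_emod b 1 s, h]

-- a positive x congruent to r with 0 < r ≤ s is at least r
theorem pv_lb {s r x : Int} (_hs : 0 < s) (hr0 : 0 < r) (hrs : r ≤ s) (hx : 0 < x)
    (hm : x % s = r % s) : r ≤ x := by
  by_cases h : r ≤ x
  · exact h
  rw [show ¬ r ≤ x ↔ x < r from not_le] at h
  rw [Int.emod_eq_of_lt (by omega) (by omega)] at hm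
  rcases eq_or_lt_of_le hrs with he | hlt
  · rw [he, Int.emod_self] at hm; omega
  · rw [Int.emod_eq_of_lt (by omega) hlt] at hm; omega

-- membership in bucket c of the closed form, as congruences modulo the period
theorem pvT_mem {n N c : Nat} (hn : 0 < n) (hc : c < n) (x : Int) :
    x ∈ pvT n N c ↔ 1 ≤ x ∧ x ≤ (N : Int) ∧
      (x % (2 * (n : Int)) = ((c : Int) + 1) % (2 * (n : Int)) ∨
       x % (2 * (n : Int)) = (2 * (n : Int) - (c : Int)) % (2 * (n : Int))) := by
  have hs : (0 : Int) < 2 * (n : Int) := by positivity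
  unfold pvT
  simp only [List.mem_map, List.mem_filter, List.mem_range, beq_iff_eq]
  constructor
  · rintro ⟨i, ⟨hiN, hit⟩, rfl⟩
    rw [pvTgt_eq_iff hn hc] at hit
    refine ⟨by omega, by omega, ?_⟩
    rcases hit with h | h
    · left
      apply pv_emod_succ
      have h1 : (i : Int) % (2 * (n : Int)) = ((i % (2 * n) : Nat) : Int) := by
        rw [Int.natCast_mod]; push_cast; ring_nf
      have h2 : ((c : Int)) % (2 * (n : Int)) = (c : Int) :=
        Int.emod_eq_of_lt (by omega) (by omega)
      rw [h1, h2, h]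
    · right
      have h1 : (i : Int) % (2 * (n : Int)) = 2 * (n : Int) - 1 - (c : Int) := by
        have : (i : Int) % (2 * (n : Int)) = ((i % (2 * n) : Nat) : Int) := by
          rw [Int.natCast_mod]; push_cast; ring_nf
        rw [this, h]; omega
      have h2 : (2 * (n : Int) - (c : Int)) % (2 * (n : Int)) =
          ((2 * (n : Int) - 1 - (c : Int)) + 1) % (2 * (n : Int)) := by ring_nf
      rw [h2]
      apply pv_emod_succ
      rw [h1, Int.emod_eq_of_lt (by omega) (by omega)]
  · rintro ⟨h1, h2, h3⟩
    refine ⟨(x - 1).toNat, ⟨by omega, ?_⟩, by omega⟩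
    rw [pvTgt_eq_iff hn hc]
    have hx : (((x - 1).toNat : Int)) = x - 1 := by omega
    have hcast : (((x - 1).toNat % (2 * n) : Nat) : Int) = (x - 1) % (2 * (n : Int)) := by
      rw [Int.natCast_mod, hx]; push_cast; ring_nf
    rcases h3 with h | h
    · left
      have := pv_emod_pred (2 * (n : Int)) x ((c : Int) + 1) h
      rw [show (c : Int) + 1 - 1 = (c : Int) by ring,
          Int.emod_eq_of_lt (show (0 : Int) ≤ (c : Int) by omega)
            (show (c : Int) < 2 * (n : Int) by omega)] at this
      omega
    · right
      have := pv_emod_pred (2 * (n : Int)) x (2 * (n : Int) - (c : Int)) h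
      rw [show 2 * (n : Int) - (c : Int) - 1 = 2 * (n : Int) - 1 - (c : Int) by ring,
          Int.emod_eq_of_lt (show (0 : Int) ≤ 2 * (n : Int) - 1 - (c : Int) by omega)
            (show 2 * (n : Int) - 1 - (c : Int) < 2 * (n : Int) by omega)] at this
      omega

-- membership in an arithmetic progression with positive step, as a congruence
theorem pvAP_mem {a b s x : Int} (hs : 0 < s) :
    x ∈ PySem.List.pyRange a b s ↔ a ≤ x ∧ x < b ∧ x % s = a % s := by
  rw [PySem.List.mem_pyRange_iff_of_pos hs]
  constructor
  · rintro ⟨h1, h2, k, hk⟩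
    refine ⟨h1, h2, ?_⟩
    have : x = a + s * k := by omega
    rw [this, Int.add_mul_emod_self_left]
  · rintro ⟨h1, h2, h3⟩
    refine ⟨h1, h2, ⟨(x - a) / s, ?_⟩⟩
    have hz : (x - a) % s = 0 := by
      rw [Int.sub_emod, h3, sub_self, Int.zero_emod]
    have := Int.mul_ediv_add_emod (x - a) s
    omega

theorem pvAP_nodup (a b : Int) {s : Int} (hs : 0 < s) :
    (PySem.List.pyRange a b s).Nodup := by
  rw [PySem.List.pyRange_of_pos a b hs]
  refine List.Nodup.map ?_ (List.nodup_range)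
  intro p q h
  simp only at h
  have h1 : s * (p : Int) = s * (q : Int) := by omega
  have h2 : (p : Int) = (q : Int) := mul_left_cancel₀ (by omega) h1
  exact_mod_cast h2

-- B's bucket c equals A's bucket c (0 ≤ c < n, as integers coming from pyRange 0 n 1)
theorem pvBucket_eq {n N c : Nat} (hn : 0 < n) (hc : c < n) :
    PySem.List.sorted
      (PySem.List.pyRange ((c : Int) + 1) ((N : Int) + 1) (2 * (n : Int)) ++
       PySem.List.pyRange (2 * (n : Int) - (c : Int)) ((N : Int) + 1) (2 * (n : Int)))
      (fun x => x) = pvT n N c := by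
  have hs : (0 : Int) < 2 * (n : Int) := by positivity
  apply PySem.List.sorted_eq_of_perm_of_pairwise_lt
  · -- pvT ~ AP1 ++ AP2 : both nodup with the same members
    have hnodT : (pvT n N c).Nodup := (pvT_pairwise n N c).imp (fun h => ne_of_lt h)
    have hnodAP : (PySem.List.pyRange ((c : Int) + 1) ((N : Int) + 1) (2 * (n : Int)) ++
        PySem.List.pyRange (2 * (n : Int) - (c : Int)) ((N : Int) + 1) (2 * (n : Int))).Nodup := by
      rw [List.nodup_append]
      refine ⟨pvAP_nodup _ _ hs, pvAP_nodup _ _ hs, ?_⟩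
      intro x hx1 y hy2 hxy
      subst hxy
      rw [pvAP_mem hs] at hx1 hy2
      obtain ⟨_, _, h3⟩ := hx1
      obtain ⟨_, _, h6⟩ := hy2
      -- x ≡ c+1 and x ≡ 2n-c (mod 2n) is impossible: the residues differ
      have e1 : ((c : Int) + 1) % (2 * (n : Int)) = (c : Int) + 1 :=
        Int.emod_eq_of_lt (by omega) (by omega)
      rcases Nat.eq_zero_or_pos c with hc0 | hc0
      · rw [hc0] at h3 h6
        rw [show (2 * (n : Int) - ((0 : Nat) : Int)) = 2 * (n : Int) by push_cast; ring,
            Int.emod_self] at h6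
        rw [show (((0 : Nat) : Int) + 1) = 1 by norm_num,
            Int.emod_eq_of_lt (show (0:Int) ≤ 1 by norm_num) (by omega)] at h3
        omega
      · have e2 : (2 * (n : Int) - (c : Int)) % (2 * (n : Int)) = 2 * (n : Int) - (c : Int) :=
          Int.emod_eq_of_lt (by omega) (by omega)
        rw [e1] at h3; rw [e2] at h6
        omega
    refine (List.perm_ext_iff_of_nodup hnodT hnodAP).mpr ?_
    intro x
    rw [pvT_mem hn hc, List.mem_append, pvAP_mem hs, pvAP_mem hs]
    constructor
    · rintro ⟨h1, h2, h3 | h3⟩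
      · exact Or.inl ⟨pv_lb hs (by omega) (by omega) (by omega) h3, by omega, h3⟩
      · exact Or.inr ⟨pv_lb hs (by omega) (by omega) (by omega) h3, by omega, h3⟩
    · rintro (⟨h1, h2, h3⟩ | ⟨h1, h2, h3⟩)
      · exact ⟨by omega, by omega, Or.inl h3⟩
      · exact ⟨by omega, by omega, Or.inr h3⟩
  · exact pvT_pairwise n N c

-- B equals the closed form (positive nb_processes, nonnegative max_order)
theorem pvB_char {n N : Nat} (hn : 0 < n) :
    dispatch_indexes_alt (N : Int) (n : Int) = pvBuckets n N := by
  unfold dispatch_indexes_alt pvBuckets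
  rw [PySem.List.pyRange_one]
  simp only [Int.sub_zero, Int.toNat_natCast, List.map_map]
  apply List.map_congr_left
  intro c hc
  rw [List.mem_range] at hc
  simp only [Function.comp_apply, Int.zero_add]
  have := pvBucket_eq (n := n) (N := N) (c := c) hn hc
  unfold pvT at this
  exact this

theorem dispatch_indexes_spec : Claim_equal_dispatch_indexes := by
  intro max_order nb_processes _ hpre
  unfold Spec_dispatch_indexes
  obtain ⟨hm, hnb⟩ := hpre
  rcases hnb with hpos | hzero
  · have hN : max_order = ((max_order.toNat : Nat) : Int) := by omega
    have hn : nb_processes = ((nb_processes.toNat : Nat) : Int) := by omega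
    rw [hN, hn, pvA_char (by omega), pvB_char (by omega)]
  · subst hzero
    by_cases hpos : 0 < nb_processes
    · have hn : nb_processes = ((nb_processes.toNat : Nat) : Int) := by omega
      rw [show (0:Int) = ((0:Nat):Int) from rfl, hn, pvA_char (by omega), pvB_char (by omega)]
    · -- nb_processes ≤ 0 : both sides are []
      have hnil : PySem.List.pyRange 0 nb_processes 1 = [] :=
        PySem.List.pyRange_one_eq_nil (by omega)
      unfold dispatch_indexes dispatch_indexes_alt
      simp [hnil, PySem.List.pyRange_one_eq_nil]
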